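-- pv_equiv track=rewrite | github.com/GabbyTab/boofun | src/boolfunc/families/builtins.py | _is_power_of_3
-- ===== SOURCE A (Python) =====
-- def _is_power_of_3(n: int) -> bool:
--     """Check if n is a power of 3."""
--     if n < 3:
--         return False
--     while n > 1:
--         if n % 3 != 0:
--             return False
--         n //= 3
--     return True
-- ===== SOURCE B (Python) =====
-- def _is_power_of_3(n: int) -> bool:
--     """Check if n is a power of 3."""
--     if n < 3:
--         return False
--     p = 3
--     while p < n:
--         p *= 3
--     return p == n
-- ===== Notes on version B (the rewrite author's own statement) =====
-- stated objective: alternative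
-- what changed: B builds the candidate power upward by repeated multiplication and a final equality test, instead of A's divide-down loop with modulo checks.
import Mathlib
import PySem

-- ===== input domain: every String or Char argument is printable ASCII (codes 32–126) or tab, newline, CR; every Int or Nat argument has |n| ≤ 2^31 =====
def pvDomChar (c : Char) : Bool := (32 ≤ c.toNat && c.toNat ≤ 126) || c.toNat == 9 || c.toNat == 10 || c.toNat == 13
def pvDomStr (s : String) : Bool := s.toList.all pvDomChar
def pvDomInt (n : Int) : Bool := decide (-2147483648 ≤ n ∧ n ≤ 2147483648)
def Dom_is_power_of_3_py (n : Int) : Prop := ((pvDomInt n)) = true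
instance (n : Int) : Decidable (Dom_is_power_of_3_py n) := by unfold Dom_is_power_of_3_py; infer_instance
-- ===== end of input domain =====

-- B replaces A's divide-down loop (mod/floordiv) with an ascending candidate power built by multiplication (objective: alternative).

-- ===== PORT A =====
-- the 'while n > 1' loop of A: n % 3 check, then n //= 3
def pvLoopA (n : Int) : Bool :=
  if _h : 1 < n then
    if PySem.Int.mod n 3 ≠ 0 then false
    else pvLoopA (PySem.Int.floordiv n 3)
  else true
termination_by n.toNat
decreasing_by
  have h0 : (0:Int) < 3 := by norm_num
  have hlt : PySem.Int.floordiv n 3 < n :=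
    (PySem.Int.floordiv_lt_iff_lt_mul h0).mpr (by omega)
  omega

def is_power_of_3_py (n : Int) : Bool :=
  if n < 3 then false else pvLoopA n

-- ===== PORT B =====
-- the 'while p < n: p *= 3' loop of B (hp is a termination aid only, not a branch)
def pvLoopB (p n : Int) (hp : 0 < p) : Bool :=
  if p < n then pvLoopB (3 * p) n (by omega)
  else p == n
termination_by (n - p).toNat
decreasing_by omega

def is_power_of_3_py_alt (n : Int) : Bool :=
  if n < 3 then false else pvLoopB 3 n (by norm_num)

-- ===== PRECONDITION & SPEC =====
def Spec_is_power_of_3_py (n : Int) (out : Bool) : Prop := out = is_power_of_3_py_alt n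
instance (n : Int) (out : Bool) : Decidable (Spec_is_power_of_3_py n out) := by unfold Spec_is_power_of_3_py; infer_instance

-- ===== CLAIM (what is proved, stated in full; the proofs are below) =====
def Claim_equal_is_power_of_3_py : Prop := ∀ (n : Int), Dom_is_power_of_3_py n → Spec_is_power_of_3_py n (is_power_of_3_py n)

-- ===== LEMMAS AND PROOFS =====

-- A's loop on positive n returns true exactly when n is a power of 3
theorem pvLoopA_iff (n : Int) : 0 < n → (pvLoopA n = true ↔ ∃ k : Nat, n = 3 ^ k) := by
  induction n using pvLoopA.induct with
  | case1 n h hmod =>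
    intro hn
    rw [pvLoopA, dif_pos h, if_pos hmod]
    have hdvd : ¬ (3 ∣ n) := fun hd =>
      hmod ((PySem.Int.mod_eq_zero_iff_dvd n 3).mpr hd)
    constructor
    · intro hf; cases hf
    · rintro ⟨k, rfl⟩
      cases k with
      | zero => exfalso; norm_num at h
      | succ j => exact absurd ⟨3 ^ j, by ring⟩ hdvd
  | case2 n h hmod ih =>
    intro hn
    have hdvd : (3:Int) ∣ n :=
      (PySem.Int.mod_eq_zero_iff_dvd n 3).mp (not_not.mp hmod)
    rw [pvLoopA, dif_pos h, if_neg hmod]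
    have hfd : PySem.Int.floordiv n 3 = n / 3 :=
      PySem.Int.floordiv_eq_ediv_of_pos (by norm_num)
    obtain ⟨m, rfl⟩ := hdvd
    have hm : 0 < m := by omega
    rw [hfd] at ih ⊢
    rw [Int.mul_ediv_cancel_left _ (by norm_num)] at ih ⊢
    rw [ih hm]
    constructor
    · rintro ⟨k, rfl⟩; exact ⟨k + 1, by ring⟩
    · rintro ⟨k, hk⟩
      cases k with
      | zero => exfalso; omega
      | succ j =>
        refine ⟨j, ?_⟩
        have h3 : (3:Int) * m = 3 * 3 ^ j := by rw [hk]; ring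
        omega
  | case3 n h =>
    intro hn
    rw [pvLoopA, dif_neg h]
    have hn1 : n = 1 := by omega
    subst hn1
    simp only [true_iff]
    exact ⟨0, by norm_num⟩

-- B's loop: with accumulator p > 0 it returns true exactly when n = 3^k * p for some k
theorem pvLoopB_iff (p n : Int) (hp : 0 < p) :
    pvLoopB p n hp = true ↔ ∃ k : Nat, n = 3 ^ k * p := by
  refine pvLoopB.induct n (fun p hp => pvLoopB p n hp = true ↔ ∃ k : Nat, n = 3 ^ k * p) ?_ ?_ p hp
  · intro p hp h ih
    rw [pvLoopB, if_pos h, ih]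
    constructor
    · rintro ⟨k, rfl⟩; exact ⟨k + 1, by ring⟩
    · rintro ⟨k, hk⟩
      cases k with
      | zero => exfalso; simp at hk; omega
      | succ j => exact ⟨j, by rw [hk]; ring⟩
  · intro p hp h
    rw [pvLoopB, if_neg h]
    simp only [beq_iff_eq]
    constructor
    · rintro rfl; exact ⟨0, by ring⟩
    · rintro ⟨k, hk⟩
      have h1 : (1:Int) ≤ 3 ^ k := one_le_pow₀ (by norm_num)
      have hle : p ≤ n := by
        calc p = 1 * p := by ring
        _ ≤ 3 ^ k * p := mul_le_mul_of_nonneg_right h1 (le_of_lt hp)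
        _ = n := hk.symm
      omega

-- ===== VERDICT (by name: the statement is the Claim_ definition above) =====
theorem is_power_of_3_py_spec : Claim_equal_is_power_of_3_py := by
  intro n _
  unfold Spec_is_power_of_3_py is_power_of_3_py is_power_of_3_py_alt
  by_cases h3 : n < 3
  · simp [h3]
  · rw [if_neg h3, if_neg h3, Bool.eq_iff_iff,
      pvLoopA_iff n (by omega), pvLoopB_iff 3 n (by norm_num)]
    constructor
    · rintro ⟨k, rfl⟩
      cases k with
      | zero => exfalso; omega
      | succ j => exact ⟨j, by ring⟩
    · rintro ⟨k, rfl⟩; exact ⟨k + 1, by ring⟩
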